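-- pv_equiv track=rewrite | github.com/Pajdzik/Mishmash | hackerrank.com/fraudulent-activity-notifications.py | calculate_double_median
-- ===== SOURCE A (Python) =====
-- def calculate_double_median(value_count, length):
--     median_i, median_j = None, None
--
--     median_index = (length // 2) + 1
--     if length % 2 != 0:
--         median_i, median_j = median_index, median_index
--     else:
--         median_i, median_j = median_index - 1, median_index
--
--     i = 0
--     median_low, median_high = None, None
--
--     for value in range(len(value_count)):
--         if median_high != None:
--             break
--
--         for _ in range(value_count[value]):
--             i += 1
--             if i == median_i:
--                 median_low = value
--             if i == median_j:
--                 median_high = value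
--
--     return median_low + median_high
-- ===== SOURCE B (Python) =====
-- def calculate_double_median(value_count, length):
--     median_j = length // 2 + 1
--     median_i = median_j if length % 2 != 0 else median_j - 1
--
--     cumulative = 0
--     median_low = median_high = None
--     for value, count in enumerate(value_count):
--         if count > 0:
--             cumulative += count
--         if median_low is None and cumulative >= median_i:
--             median_low = value
--         if median_high is None and cumulative >= median_j:
--             median_high = value
--
--     return median_low + median_high
-- ===== Notes on version B (the rewrite author's own statement) =====
-- stated objective: faster
-- what changed: Replaces A's unit-by-unit counting loop (one iteration per individual occurrence inside each bucket) by a single cumulative-sum pass over the buckets that locates the buckets containing the two median positions directly.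
import Mathlib
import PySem

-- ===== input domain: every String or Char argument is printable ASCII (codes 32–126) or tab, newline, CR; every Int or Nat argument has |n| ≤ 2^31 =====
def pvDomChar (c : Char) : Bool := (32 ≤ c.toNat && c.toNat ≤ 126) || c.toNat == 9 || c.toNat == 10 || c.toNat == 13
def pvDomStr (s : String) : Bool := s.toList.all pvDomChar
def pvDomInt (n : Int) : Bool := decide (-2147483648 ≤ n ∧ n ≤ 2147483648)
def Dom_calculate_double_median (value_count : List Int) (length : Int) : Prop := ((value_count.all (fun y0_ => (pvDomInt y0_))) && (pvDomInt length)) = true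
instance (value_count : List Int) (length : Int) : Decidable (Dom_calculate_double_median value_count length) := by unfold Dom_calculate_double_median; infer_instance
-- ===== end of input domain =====

-- B replaces A's unit-by-unit counting (one iteration per occurrence) by one cumulative-sum
-- pass over the buckets; return values agree on all inputs where the Python A returns (Pre_).

-- ===== PORT A =====
-- inner loop: for _ in range(value_count[value]): i += 1; set median_low/high on exact hit
def pvInnerA (v : Int) (n : Nat) (i : Int) (lo hi : Option Int) (mi mj : Int) :
    Int × Option Int × Option Int :=
  match n with
  | 0 => (i, lo, hi)
  | n + 1 =>
    let i' := i + 1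
    let lo' := if i' = mi then some v else lo
    let hi' := if i' = mj then some v else hi
    pvInnerA v n i' lo' hi' mi mj

-- outer loop over the bucket indices, with the 'break' once median_high is set
def pvLoopA (l : List (Int × Int)) (i : Int) (lo hi : Option Int) (mi mj : Int) :
    Int × Option Int × Option Int :=
  match l with
  | [] => (i, lo, hi)
  | (v, c) :: rest =>
    if hi ≠ none then (i, lo, hi)
    else
      let s := pvInnerA v c.toNat i lo hi mi mj
      pvLoopA rest s.1 s.2.1 s.2.2 mi mj

def calculate_double_median (value_count : List Int) (length : Int) : Int :=
  let medianIndex := PySem.Int.floordiv length 2 + 1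
  let mi := if PySem.Int.mod length 2 ≠ 0 then medianIndex else medianIndex - 1
  let mj := medianIndex
  let s := pvLoopA (PySem.List.enumerate value_count 0) 0 none none mi mj
  -- Python raises TypeError (None + int) when a median position is unreached: excluded by Pre_
  s.2.1.getD 0 + s.2.2.getD 0

-- ===== PORT B =====
def pvStepB (mi mj : Int) (st : Int × Option Int × Option Int) (p : Int × Int) :
    Int × Option Int × Option Int :=
  let cum := if 0 < p.2 then st.1 + p.2 else st.1
  let lo := if st.2.1 = none ∧ mi ≤ cum then some p.1 else st.2.1
  let hi := if st.2.2 = none ∧ mj ≤ cum then some p.1 else st.2.2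
  (cum, lo, hi)

def calculate_double_median_alt (value_count : List Int) (length : Int) : Int :=
  let mj := PySem.Int.floordiv length 2 + 1
  let mi := if PySem.Int.mod length 2 ≠ 0 then mj else mj - 1
  let s := (PySem.List.enumerate value_count 0).foldl (pvStepB mi mj) (0, none, none)
  s.2.1.getD 0 + s.2.2.getD 0

-- ===== PRECONDITION & SPEC =====
-- Exactly the inputs on which Python A returns: length ≥ 1 and the (nonnegative parts of the)
-- counts reach the upper median position; otherwise median_low/median_high stay None and
-- Python raises TypeError on 'median_low + median_high'.
def Pre_calculate_double_median (value_count : List Int) (length : Int) : Prop :=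
  1 ≤ length ∧
  PySem.Int.floordiv length 2 + 1 ≤ (value_count.map (fun c => max c 0)).sum
instance (value_count : List Int) (length : Int) :
    Decidable (Pre_calculate_double_median value_count length) := by
  unfold Pre_calculate_double_median; infer_instance

def pvWitness_calculate_double_median : List Int × Int := ([1, 1], 2)

def Spec_calculate_double_median (value_count : List Int) (length : Int) (out : Int) : Prop :=
  out = calculate_double_median_alt value_count length
instance (value_count : List Int) (length : Int) (out : Int) :
    Decidable (Spec_calculate_double_median value_count length out) := by
  unfold Spec_calculate_double_median; infer_instance

-- ===== CLAIM (what is proved, stated in full; the proofs are below) =====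
def Claim_equal_calculate_double_median : Prop := ∀ (value_count : List Int) (length : Int), Dom_calculate_double_median value_count length → Pre_calculate_double_median value_count length → Spec_calculate_double_median value_count length (calculate_double_median value_count length)

-- ===== LEMMAS AND PROOFS =====

-- characterisation of A's inner loop
lemma pvInnerA_char (v : Int) (n : Nat) (i mi mj : Int) (lo hi : Option Int)
    (hlo : lo = none ↔ i < mi) (hhi : hi = none ↔ i < mj) :
    pvInnerA v n i lo hi mi mj =
      (i + n,
       (if lo = none ∧ mi ≤ i + n then some v else lo),
       (if hi = none ∧ mj ≤ i + n then some v else hi)) := by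
  induction n generalizing i lo hi with
  | zero =>
    have h1 : ¬ (lo = none ∧ mi ≤ i + (0:Nat)) := by
      rintro ⟨h, h'⟩; have := hlo.mp h; simp at h'; omega
    have h2 : ¬ (hi = none ∧ mj ≤ i + (0:Nat)) := by
      rintro ⟨h, h'⟩; have := hhi.mp h; simp at h'; omega
    simp only [pvInnerA]
    simp at h1 h2 ⊢
    refine ⟨fun h h' => absurd h' ?_, fun h h' => absurd h' ?_⟩
    · have := hlo.mp h; omega
    · have := hhi.mp h; omega
  | succ n ih =>
    have hlo1 : (if i + 1 = mi then some v else lo) = none ↔ i + 1 < mi := by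
      split_ifs with h
      · simp; omega
      · rw [hlo]; omega
    have hhi1 : (if i + 1 = mj then some v else hi) = none ↔ i + 1 < mj := by
      split_ifs with h
      · simp; omega
      · rw [hhi]; omega
    simp only [pvInnerA]
    rw [ih (i + 1) _ _ hlo1 hhi1]
    have hc : ((n : Nat) + 1 : Nat) = (n + 1 : Nat) := rfl
    refine Prod.ext (by push_cast; ring) (Prod.ext ?_ ?_) <;> push_cast
    · rcases lo with _ | a
      · have hilt : i < mi := hlo.mp rfl
        split_ifs <;> simp_all <;> omega
      · have hge : ¬ i < mi := by simp at hlo; omega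
        split_ifs <;> simp_all <;> omega
    · rcases hi with _ | b
      · have hilt : i < mj := hhi.mp rfl
        split_ifs <;> simp_all <;> omega
      · have hge : ¬ i < mj := by simp at hhi; omega
        split_ifs <;> simp_all <;> omega

-- once both medians are found, B's fold never changes them
lemma pvFoldB_frozen (mi mj : Int) (l : List (Int × Int)) (cum a b : Int) :
    (l.foldl (pvStepB mi mj) (cum, some a, some b)).2 = (some a, some b) := by
  induction l generalizing cum with
  | nil => rfl
  | cons p rest ih => simpa [pvStepB] using ih _

-- the two loops produce the same (median_low, median_high) pair
lemma pvLoop_eq (mi mj : Int) (hle : mi ≤ mj) (l : List (Int × Int)) (i : Int)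
    (lo hi : Option Int) (hlo : lo = none ↔ i < mi) (hhi : hi = none ↔ i < mj) :
    (pvLoopA l i lo hi mi mj).2 = (l.foldl (pvStepB mi mj) (i, lo, hi)).2 := by
  induction l generalizing i lo hi with
  | nil => rfl
  | cons p rest ih =>
    obtain ⟨v, c⟩ := p
    rcases hi with _ | b
    · have hlt : i < mj := hhi.mp rfl
      have hc : ((c.toNat : Nat) : Int) = if 0 < c then c else 0 := by
        split_ifs with h <;> omega
      have hstepA : pvInnerA v c.toNat i lo none mi mj =
          (i + (if 0 < c then c else 0),
           (if lo = none ∧ mi ≤ i + (if 0 < c then c else 0) then some v else lo),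
           (if mj ≤ i + (if 0 < c then c else 0) then some v else none)) := by
        rw [pvInnerA_char v c.toNat i mi mj lo none hlo hhi, hc]
        simp
      have hstepB : pvStepB mi mj (i, lo, none) (v, c) =
          (i + (if 0 < c then c else 0),
           (if lo = none ∧ mi ≤ i + (if 0 < c then c else 0) then some v else lo),
           (if mj ≤ i + (if 0 < c then c else 0) then some v else none)) := by
        simp only [pvStepB]
        split_ifs <;> simp_all <;> omega
      simp only [pvLoopA, ne_eq, not_true_eq_false, if_neg, not_false_eq_true, hstepA,
        List.foldl_cons, hstepB]
      exact ih _ _ _ (by split_ifs with h <;> simp_all <;> omega)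
        (by split_ifs with h <;> simp_all <;> omega)
    · have hmj : mj ≤ i := by
        by_contra h
        simp at hhi; omega
      rcases lo with _ | a
      · have := hlo.mp rfl; omega
      · simp only [pvLoopA, ne_eq, reduceCtorEq, not_false_eq_true, if_pos,
          List.foldl_cons, pvStepB]
        simp [pvFoldB_frozen]

lemma pvMain_aux (value_count : List Int) (mi mj : Int) (h1 : 1 ≤ mi) (hle : mi ≤ mj) :
    (pvLoopA (PySem.List.enumerate value_count 0) 0 none none mi mj).2.1.getD 0 +
      (pvLoopA (PySem.List.enumerate value_count 0) 0 none none mi mj).2.2.getD 0 =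
    ((PySem.List.enumerate value_count 0).foldl (pvStepB mi mj) (0, none, none)).2.1.getD 0 +
      ((PySem.List.enumerate value_count 0).foldl (pvStepB mi mj) (0, none, none)).2.2.getD 0 := by
  have key := pvLoop_eq mi mj hle (PySem.List.enumerate value_count 0) 0 none none
      (by simp; omega) (by simp; omega)
  rw [key]

-- ===== VERDICT (by name: the statement is the Claim_ definition above) =====
theorem calculate_double_median_spec : Claim_equal_calculate_double_median := by
  intro value_count length _ hpre
  obtain ⟨hlen, _⟩ := hpre
  have hfd : PySem.Int.floordiv length 2 = length / 2 :=
    PySem.Int.floordiv_eq_ediv_of_pos (by norm_num)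
  have hmd : PySem.Int.mod length 2 = length % 2 :=
    PySem.Int.mod_eq_emod_of_pos (by norm_num)
  have hmi1 : 1 ≤ (if PySem.Int.mod length 2 ≠ 0 then PySem.Int.floordiv length 2 + 1
      else PySem.Int.floordiv length 2 + 1 - 1) := by
    rw [hmd, hfd]; split_ifs with h <;> omega
  have hle : (if PySem.Int.mod length 2 ≠ 0 then PySem.Int.floordiv length 2 + 1
      else PySem.Int.floordiv length 2 + 1 - 1) ≤ PySem.Int.floordiv length 2 + 1 := by
    split_ifs <;> omega
  unfold Spec_calculate_double_median
  exact pvMain_aux value_count _ _ hmi1 hle
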